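-- pv_equiv track=rewrite | github.com/s3bu7i/Python-Courses | Tasks/_random.py | generate_permutation
-- ===== SOURCE A (Python) =====
-- def is_complex(num):
--     for i in range(2, num):
--         if num % i == 0:
--             return True
--     return False
--
-- def generate_permutation(n):
--     if n <= 2:
--         return [-1]
--
--     permutation = list(range(1, n + 1))
--
--     for i in range(n - 1):
--         if is_complex(sum(permutation[:i+1])):
--             permutation[i], permutation[i+1] = permutation[i+1], permutation[i]
--
--     if is_complex(sum(permutation)):
--         return permutation
--     else:
--         return [-1]
-- ===== SOURCE B (Python) =====
-- def generate_permutation(n):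
--     # Each swap at step i touches only positions <= i, so the first i+1 slots
--     # always hold the multiset {1..i+1} and the tested sum is the triangular
--     # number T(i+1) = (i+1)(i+2)/2.  T(1) and T(2) are not composite, while
--     # T(k) is composite for every larger k; hence exactly the swaps at steps
--     # i = 2..n-2 fire, which cycles the value three to the end, and the final
--     # sum T(n) is composite whenever the early-return guard is passed, so the
--     # permutation is always returned.
--     if n <= 2:
--         return [-1]
--     return [1, 2] + list(range(4, n + 1)) + [3]
-- ===== Notes on version B (the rewrite author's own statement) =====
-- stated objective: faster
-- what changed: Replaces the triple-nested computation (per-step prefix-sum recomputation plus a full trial-division compositeness scan) with a proven closed form: the tested sums are fixed triangular numbers, composite for every index beyond the first two, so the answer [1,2,4,...,n,3] is built directly.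
import Mathlib
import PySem

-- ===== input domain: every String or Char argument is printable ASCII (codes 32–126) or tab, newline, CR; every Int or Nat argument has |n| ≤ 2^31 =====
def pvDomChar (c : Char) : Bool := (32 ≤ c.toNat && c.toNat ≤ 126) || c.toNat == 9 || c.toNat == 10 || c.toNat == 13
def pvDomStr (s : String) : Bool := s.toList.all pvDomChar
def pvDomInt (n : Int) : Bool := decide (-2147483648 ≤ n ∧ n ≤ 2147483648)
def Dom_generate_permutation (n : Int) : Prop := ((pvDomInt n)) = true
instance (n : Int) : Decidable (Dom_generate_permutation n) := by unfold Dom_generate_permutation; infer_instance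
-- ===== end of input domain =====

-- B replaces A's triple-nested computation by the proven closed form [1,2,4,…,n,3].

-- ===== PORT A =====
-- for i in range(2, num): if num % i == 0: return True  (early return, i counts up, fuel = len(range))
def isComplexAux (num : Int) : Nat → Int → Bool
  | 0, _ => false
  | Nat.succ k, i => if PySem.Int.mod num i == 0 then true else isComplexAux num k (i + 1)

def is_complex (num : Int) : Bool := isComplexAux num (num - 2).toNat 2

def gpStep (p : List Int) (i : Int) : List Int :=
  if is_complex (PySem.List.slice p none (some (i + 1))).sum then
    PySem.List.pySetD (PySem.List.pySetD p i (PySem.List.pyGetD p (i + 1) 0)) (i + 1)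
      (PySem.List.pyGetD p i 0)
  else p

def generate_permutation (n : Int) : List Int :=
  if n ≤ 2 then [-1]
  else
    let perm := (PySem.List.pyRange 0 (n - 1) 1).foldl gpStep (PySem.List.pyRange 1 (n + 1) 1)
    if is_complex perm.sum then perm else [-1]

-- ===== PORT B =====
def generate_permutation_alt (n : Int) : List Int :=
  if n ≤ 2 then [-1] else [1, 2] ++ PySem.List.pyRange 4 (n + 1) 1 ++ [3]

-- ===== PRECONDITION & SPEC =====
def Spec_generate_permutation (n : Int) (out : List Int) : Prop := out = generate_permutation_alt n
instance (n : Int) (out : List Int) : Decidable (Spec_generate_permutation n out) := by unfold Spec_generate_permutation; infer_instance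

-- ===== CLAIM (what is proved, stated in full; the proofs are below) =====
def Claim_equal_generate_permutation : Prop := ∀ (n : Int), Dom_generate_permutation n → Spec_generate_permutation n (generate_permutation n)

-- ===== LEMMAS AND PROOFS =====

-- The loop state after the first m iterations (for 3 ≤ n, m ≤ n-1).
def gpState (n : Int) (m : Nat) : List Int :=
  if (m : Int) ≤ 2 then PySem.List.pyRange 1 (n + 1) 1
  else [1, 2] ++ PySem.List.pyRange 4 ((m : Int) + 2) 1 ++ [3]
       ++ PySem.List.pyRange ((m : Int) + 2) (n + 1) 1

lemma getD_append_cons (L : List Int) (x : Int) (r : List Int) (d : Int) :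
    (L ++ x :: r).getD L.length d = x := by simp [List.getD]

lemma set_append_cons (L : List Int) (x v : Int) (r : List Int) :
    (L ++ x :: r).set L.length v = L ++ v :: r := by simp

lemma take_append_len (L r : List Int) (k : Nat) :
    (L ++ r).take (L.length + k) = L ++ r.take k := by
  rw [List.take_append]; simp

lemma two_mul_sum_pyRange (k : Nat) (a : Int) :
    2 * (PySem.List.pyRange a (a + k) 1).sum = k * (2 * a + k - 1) := by
  induction k with
  | zero => simp [PySem.List.pyRange_one_eq_nil]
  | succ k ih =>
      have h : a + (k + 1 : Nat) = (a + k) + 1 := by push_cast; ring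
      rw [h, PySem.List.pyRange_one_succ_right (by omega)]
      simp only [List.sum_append, List.sum_cons, List.sum_nil]
      push_cast
      push_cast at ih
      linarith

lemma two_mul_sum_pyRange' (a b : Int) (h : a ≤ b) :
    2 * (PySem.List.pyRange a b 1).sum = (b - a) * (a + b - 1) := by
  have hb : a + ((b - a).toNat : Int) = b := by omega
  have h2 := two_mul_sum_pyRange (b - a).toNat a
  rw [hb] at h2
  have hc : ((b - a).toNat : Int) = b - a := by omega
  rw [hc] at h2
  linarith

lemma isComplexAux_true (num d : Int) (hd : PySem.Int.mod num d = 0) :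
    ∀ (k : Nat) (i : Int), i ≤ d → d < i + k → isComplexAux num k i = true := by
  intro k
  induction k with
  | zero => intro i h1 h2; omega
  | succ k ih =>
      intro i h1 h2
      unfold isComplexAux
      by_cases hi : PySem.Int.mod num i = 0
      · simp [hi]
      · rw [if_neg (by simpa using hi)]
        have hne : i ≠ d := fun h => hi (h ▸ hd)
        exact ih (i + 1) (by omega) (by push_cast at h2 ⊢; omega)

lemma is_complex_of_divisor (t d : Int) (h2 : 2 ≤ d) (hlt : d < t) (hdvd : d ∣ t) :
    is_complex t = true := by
  unfold is_complex
  exact isComplexAux_true t d ((PySem.Int.mod_eq_zero_iff_dvd t d).mpr hdvd) _ 2 h2 (by omega)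

-- a number S with 2*S = k*(k+1), k ≥ 3, is composite
lemma is_complex_tri (S k : Int) (hk : 3 ≤ k) (hS : 2 * S = k * (k + 1)) :
    is_complex S = true := by
  rcases Int.even_or_odd k with ⟨q, hq⟩ | ⟨q, hq⟩
  · have hq2 : 2 ≤ q := by omega
    have hSe : S = (k + 1) * q := by nlinarith
    exact is_complex_of_divisor S (k + 1) (by omega) (by nlinarith) ⟨q, hSe⟩
  · have hq1 : 1 ≤ q := by omega
    have hSe : S = k * (q + 1) := by nlinarith
    exact is_complex_of_divisor S k (by omega) (by nlinarith) ⟨q + 1, hSe⟩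

lemma gpStep_noswap (L : List Int) (x : Int) (r : List Int)
    (hc : is_complex (L.sum + x) = false) :
    gpStep (L ++ x :: r) (L.length : Int) = L ++ x :: r := by
  unfold gpStep
  rw [PySem.List.slice_to _ (by omega)]
  rw [show ((L.length : Int) + 1).toNat = L.length + 1 by omega]
  rw [take_append_len]
  simp only [List.take_succ_cons, List.take_zero, List.sum_append, List.sum_cons,
    List.sum_nil, add_zero, hc, Bool.false_eq_true, if_false]

lemma gpStep_swap (L : List Int) (x y : Int) (r : List Int)
    (hc : is_complex (L.sum + x) = true) :
    gpStep (L ++ x :: y :: r) (L.length : Int) = L ++ y :: x :: r := by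
  unfold gpStep
  rw [PySem.List.slice_to _ (by omega)]
  rw [show ((L.length : Int) + 1).toNat = L.length + 1 by omega]
  rw [take_append_len]
  have hget1 : PySem.List.pyGetD (L ++ x :: y :: r) ((L.length : Int) + 1) 0 = y := by
    rw [show ((L.length : Int) + 1) = ((L.length + 1 : Nat) : Int) by push_cast; ring]
    rw [PySem.List.pyGetD_natCast]
    rw [show L ++ x :: y :: r = (L ++ [x]) ++ y :: r by simp]
    rw [show L.length + 1 = (L ++ [x]).length by simp]
    exact getD_append_cons _ _ _ _
  have hget0 : PySem.List.pyGetD (L ++ x :: y :: r) (L.length : Int) 0 = x := by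
    rw [PySem.List.pyGetD_natCast]; exact getD_append_cons _ _ _ _
  rw [hget1, hget0]
  simp only [List.take_succ_cons, List.take_zero, List.sum_append, List.sum_cons,
    List.sum_nil, add_zero, hc, if_true]
  rw [PySem.List.pySetD_natCast, set_append_cons]
  rw [show ((L.length : Int) + 1) = ((L.length + 1 : Nat) : Int) by push_cast; ring]
  rw [PySem.List.pySetD_natCast]
  rw [show L ++ y :: y :: r = (L ++ [y]) ++ y :: r by simp]
  rw [show L.length + 1 = (L ++ [y]).length by simp]
  rw [set_append_cons]
  simp

lemma gp_step (n : Int) (hn : 3 ≤ n) (m : Nat) (hm : (m : Int) ≤ n - 2) :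
    gpStep (gpState n m) (m : Int) = gpState n (m + 1) := by
  have hcons : PySem.List.pyRange 1 (n + 1) 1 = 1 :: 2 :: 3 :: PySem.List.pyRange 4 (n + 1) 1 := by
    rw [PySem.List.pyRange_one_cons (by omega)]
    rw [show (1 : Int) + 1 = 2 by ring, PySem.List.pyRange_one_cons (by omega)]
    rw [show (2 : Int) + 1 = 3 by ring, PySem.List.pyRange_one_cons (by omega)]
    norm_num
  match m with
  | 0 =>
      have h := gpStep_noswap [] 1 (2 :: 3 :: PySem.List.pyRange 4 (n + 1) 1) (by decide)
      simp only [gpState]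
      rw [if_pos (by norm_num), if_pos (by norm_num), hcons]
      simpa using h
  | 1 =>
      have h := gpStep_noswap [1] 2 (3 :: PySem.List.pyRange 4 (n + 1) 1) (by decide)
      simp only [gpState]
      rw [if_pos (by norm_num), if_pos (by norm_num), hcons]
      simpa using h
  | 2 =>
      have h4 : PySem.List.pyRange 4 (n + 1) 1 = 4 :: PySem.List.pyRange 5 (n + 1) 1 := by
        rw [PySem.List.pyRange_one_cons (by omega)]; norm_num
      have h := gpStep_swap [1, 2] 3 4 (PySem.List.pyRange 5 (n + 1) 1) (by decide)
      have h45 : PySem.List.pyRange 4 (5 : Int) 1 = [4] := by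
        rw [show (5 : Int) = 4 + 1 by ring]; exact PySem.List.pyRange_one_singleton 4
      simp only [gpState]
      rw [if_pos (by norm_num), if_neg (by norm_num), hcons, h4]
      rw [show ((2 + 1 : Nat) : Int) + 2 = 5 by norm_num, h45]
      simpa using h
  | (k + 3) =>
      have hmi : (3 : Int) ≤ ((k + 3 : Nat) : Int) := by push_cast; omega
      have hL : ([1, 2] ++ PySem.List.pyRange 4 (((k + 3 : Nat) : Int) + 2) 1).length = k + 3 := by
        simp [PySem.List.length_pyRange_one]; omega
      have hBcons : PySem.List.pyRange (((k + 3 : Nat) : Int) + 2) (n + 1) 1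
          = (((k + 3 : Nat) : Int) + 2) :: PySem.List.pyRange (((k + 3 : Nat) : Int) + 3) (n + 1) 1 := by
        rw [PySem.List.pyRange_one_cons (by omega)]
        rw [show ((k + 3 : Nat) : Int) + 2 + 1 = ((k + 3 : Nat) : Int) + 3 by ring]
      have hsum : is_complex (([1, 2] ++ PySem.List.pyRange 4 (((k + 3 : Nat) : Int) + 2) 1).sum + 3)
          = true := by
        apply is_complex_tri _ (((k + 3 : Nat) : Int) + 1) (by omega)
        have h2 := two_mul_sum_pyRange' 4 (((k + 3 : Nat) : Int) + 2) (by omega)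
        simp only [List.sum_append, List.sum_cons, List.sum_nil]
        nlinarith
      have h := gpStep_swap ([1, 2] ++ PySem.List.pyRange 4 (((k + 3 : Nat) : Int) + 2) 1) 3
        (((k + 3 : Nat) : Int) + 2) (PySem.List.pyRange (((k + 3 : Nat) : Int) + 3) (n + 1) 1) hsum
      rw [hL] at h
      have hnext : PySem.List.pyRange 4 (((k + 3 + 1 : Nat) : Int) + 2) 1
          = PySem.List.pyRange 4 (((k + 3 : Nat) : Int) + 2) 1 ++ [((k + 3 : Nat) : Int) + 2] := by
        rw [show (((k + 3 + 1 : Nat) : Int) + 2) = (((k + 3 : Nat) : Int) + 2) + 1 by push_cast; ring]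
        exact PySem.List.pyRange_one_succ_right (by omega)
      simp only [gpState]
      rw [if_neg (by omega), if_neg (by push_cast; omega)]
      rw [hBcons, hnext]
      rw [show (((k + 3 + 1 : Nat) : Int) + 2) = ((k + 3 : Nat) : Int) + 3 by push_cast; ring]
      simpa [List.append_assoc] using h

lemma gp_inv (n : Int) (hn : 3 ≤ n) (m : Nat) (hm : (m : Int) ≤ n - 1) :
    (PySem.List.pyRange 0 (m : Int) 1).foldl gpStep (PySem.List.pyRange 1 (n + 1) 1)
      = gpState n m := by
  induction m with
  | zero => simp [PySem.List.pyRange_one_eq_nil, gpState]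
  | succ m ih =>
      have h1 : ((m + 1 : Nat) : Int) = (m : Int) + 1 := by push_cast; ring
      rw [h1, show PySem.List.pyRange 0 ((m : Int) + 1) 1
            = PySem.List.pyRange 0 (m : Int) 1 ++ [(m : Int)] from
          PySem.List.pyRange_one_succ_right (by omega), List.foldl_append]
      rw [ih (by omega)]
      simp only [List.foldl_cons, List.foldl_nil]
      exact gp_step n hn m (by omega)

-- ===== VERDICT (by name: the statement is the Claim_ definition above) =====
theorem generate_permutation_spec : Claim_equal_generate_permutation := by
  intro n _
  unfold Spec_generate_permutation generate_permutation generate_permutation_alt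
  by_cases h2 : n ≤ 2
  · simp [h2]
  · simp only [h2, if_false]
    have hn : 3 ≤ n := by omega
    have hm : ((n - 1).toNat : Int) = n - 1 := by omega
    rw [show n - 1 = ((n - 1).toNat : Int) from hm.symm]
    rw [gp_inv n hn (n - 1).toNat (by omega)]
    by_cases h3 : n = 3
    · subst h3; decide
    · have hn4 : 4 ≤ n := by omega
      have hst : gpState n (n - 1).toNat
          = [1, 2] ++ PySem.List.pyRange 4 (n + 1) 1 ++ [3] := by
        unfold gpState
        rw [if_neg (by omega)]
        rw [show ((n - 1).toNat : Int) + 2 = n + 1 by omega]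
        rw [PySem.List.pyRange_one_eq_nil (le_refl _)]
        simp
      rw [hst]
      have hsum : is_complex ([1, 2] ++ PySem.List.pyRange 4 (n + 1) 1 ++ [3] : List Int).sum = true := by
        apply is_complex_tri _ n hn
        have h2s := two_mul_sum_pyRange' 4 (n + 1) (by omega)
        simp only [List.sum_append, List.sum_cons, List.sum_nil]
        nlinarith
      rw [hsum]
      simp
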